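-- pv_equiv track=rewrite | github.com/paulklemstine/factor | lean/demo/Pythagorean/QuadrupleGravityEnergy/modular_forms_demo.py | r3
-- ===== SOURCE A (Python) =====
-- import math
--
-- def r3(N):
--     """Count representations of N as a² + b² + c² (with signs and order)."""
--     count = 0
--     sqrt_N = int(math.isqrt(N))
--     for a in range(-sqrt_N, sqrt_N + 1):
--         for b in range(-sqrt_N, sqrt_N + 1):
--             rem = N - a*a - b*b
--             if rem < 0:
--                 continue
--             c = int(math.isqrt(rem))
--             if c*c == rem:
--                 count += 1
--                 if c > 0:
--                     count += 1  # -c also works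
--     return count
-- ===== SOURCE B (Python) =====
-- import math
--
-- def r3(N):
--     """Count representations of N as a² + b² + c² (with signs and order)."""
--     s = int(math.isqrt(N))
--     s2 = [0] * (N + 1)
--     for a in range(-s, s + 1):
--         for b in range(-s, s + 1):
--             v = a * a + b * b
--             if v <= N:
--                 s2[v] += 1
--     total = 0
--     for c in range(-s, s + 1):
--         total += s2[N - c * c]
--     return total
-- ===== Notes on version B (the rewrite author's own statement) =====
-- stated objective: alternative
-- what changed: A tests each remainder N-a²-b² for being a perfect square inline with isqrt; B first tabulates a histogram s2[v] of signed ordered pairs with a²+b²=v and then sums s2[N-c²] over c, replacing the perfect-square test by table indexing.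
import Mathlib
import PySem

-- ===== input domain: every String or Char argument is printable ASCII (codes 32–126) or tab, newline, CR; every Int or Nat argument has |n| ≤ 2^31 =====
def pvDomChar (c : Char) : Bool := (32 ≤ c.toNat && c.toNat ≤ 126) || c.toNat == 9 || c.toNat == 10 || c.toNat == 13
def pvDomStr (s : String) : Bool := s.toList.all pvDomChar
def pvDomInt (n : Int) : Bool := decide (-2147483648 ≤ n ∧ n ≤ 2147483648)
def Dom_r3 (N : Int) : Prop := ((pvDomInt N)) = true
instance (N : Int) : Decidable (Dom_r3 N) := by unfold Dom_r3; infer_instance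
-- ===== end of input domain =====

-- B replaces A's inline perfect-square test per (a,b) by a two-pass scheme: tabulate a histogram of
-- two-square pair counts, then sum the histogram at N - c*c over c (objective: alternative algorithm).


-- ===== PORT A =====
def r3 (N : Int) : Int :=
  let sqrtN : Int := (Nat.sqrt N.toNat : Int)   -- math.isqrt(N); Pre_ excludes negative N (ValueError)
  (PySem.List.pyRange (-sqrtN) (sqrtN + 1) 1).foldl (fun count a =>
    (PySem.List.pyRange (-sqrtN) (sqrtN + 1) 1).foldl (fun count b =>
      let rem := N - a * a - b * b
      if rem < 0 then count
      else
        let c : Int := (Nat.sqrt rem.toNat : Int)   -- math.isqrt(rem), rem ≥ 0 here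
        if c * c = rem then (if c > 0 then count + 1 + 1 else count + 1)
        else count) count) 0

-- ===== PORT B =====
def r3_alt (N : Int) : Int :=
  let s : Int := (Nat.sqrt N.toNat : Int)   -- math.isqrt(N); Pre_ excludes negative N (ValueError)
  -- the Python list s2 is ported as an Array so the port evaluates fast; every index used
  -- (v when v ≤ N, and N - c*c) is nonnegative and < N+1 = len(s2), so .toNat,
  -- setIfInBounds and getD compute exactly Python's in-range list indexing here
  let s2 : Array Int :=
    (PySem.List.pyRange (-s) (s + 1) 1).foldl (fun s2 a =>
      (PySem.List.pyRange (-s) (s + 1) 1).foldl (fun s2 b =>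
        let v := a * a + b * b
        if v ≤ N then s2.setIfInBounds v.toNat (s2.getD v.toNat 0 + 1) else s2) s2)
      (Array.replicate (N + 1).toNat 0)
  (PySem.List.pyRange (-s) (s + 1) 1).foldl (fun total c =>
    total + s2.getD (N - c * c).toNat 0) 0

-- ===== PRECONDITION & SPEC =====
-- Pre_ excludes negative N, on which Python's math.isqrt raises ValueError in both A and B.
def Pre_r3 (N : Int) : Prop := 0 ≤ N
instance (N : Int) : Decidable (Pre_r3 N) := by unfold Pre_r3; infer_instance
def pvWitness_r3 : Int := 5
def Spec_r3 (N : Int) (out : Int) : Prop := out = r3_alt N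
instance (N : Int) (out : Int) : Decidable (Spec_r3 N out) := by unfold Spec_r3; infer_instance

-- ===== CLAIM (what is proved, stated in full; the proofs are below) =====
def Claim_equal_r3 : Prop := ∀ (N : Int), Dom_r3 N → Pre_r3 N → Spec_r3 N (r3 N)

-- ===== LEMMAS AND PROOFS =====

-- the signed 0/1-indicator sum over one range
def pvInd (p : Bool) : Int := if p then 1 else 0

theorem pv_pvInd_sum (p : Int → Bool) (l : List Int) :
    (l.map (fun x => pvInd (p x))).sum = ((l.countP p : Nat) : Int) := by
  simp [pvInd, PySem.List.sum_map_ite_one_zero p l]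

-- generic: exchanging two nested list sums
theorem pv_sum_swap (l m : List Int) (f : Int → Int → Int) :
    (l.map (fun x => (m.map (f x)).sum)).sum = (m.map (fun y => (l.map (fun x => f x y)).sum)).sum := by
  induction l with
  | nil => simp
  | cons x t ih =>
      simp only [List.map_cons, List.sum_cons, ih, PySem.List.sum_map_add_int]

-- countP of a disjunction of disjoint predicates
theorem pv_countP_or (l : List Int) (p q : Int → Bool)
    (h : ∀ x ∈ l, ¬(p x = true ∧ q x = true)) :
    l.countP (fun x => p x || q x) = l.countP p + l.countP q := by
  induction l with
  | nil => simp
  | cons x t ih =>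
      have hx := h x (by simp)
      have ht : ∀ y ∈ t, ¬(p y = true ∧ q y = true) := fun y hy => h y (by simp [hy])
      simp only [List.countP_cons, ih ht]
      cases hp : p x <;> cases hq : q x <;> simp_all <;> omega

-- isqrt characterisation: any integer square root forces Nat.sqrt to hit exactly
theorem pv_sqrt_of_sq (c m : Int) (h : c * c = m) :
    ((Nat.sqrt m.toNat : Nat) : Int) = (c.natAbs : Int) := by
  have h1 : m.toNat = c.natAbs * c.natAbs := by
    have h2 : ((c.natAbs * c.natAbs : Nat) : Int) = m := by
      push_cast; rw [abs_mul_abs_self]; exact h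
    omega
  rw [h1]
  norm_cast
  rw [← pow_two]
  exact Nat.sqrt_eq' c.natAbs

-- counting solutions of c*c = rem in range(-s, s+1)
theorem pv_countR (s rem : Int) (hs0 : 0 ≤ s)
    (hle : 0 ≤ rem → ((Nat.sqrt rem.toNat : Nat) : Int) ≤ s) :
    ((PySem.List.pyRange (-s) (s + 1) 1).countP (fun c => decide (c * c = rem)) : Int) =
      if rem < 0 then 0
      else if ((Nat.sqrt rem.toNat : Nat) : Int) * ((Nat.sqrt rem.toNat : Nat) : Int) = rem then
        (if 0 < ((Nat.sqrt rem.toNat : Nat) : Int) then 2 else 1)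
      else 0 := by
  by_cases hneg : rem < 0
  · rw [if_pos hneg]
    have : (PySem.List.pyRange (-s) (s + 1) 1).countP (fun c => decide (c * c = rem)) = 0 :=
      List.countP_eq_zero.mpr (by
        intro c _
        simp only [decide_eq_true_eq]
        nlinarith [mul_self_nonneg c])
    simp [this]
  · have hrem : 0 ≤ rem := by omega
    have hc00 : (0:Int) ≤ ((Nat.sqrt rem.toNat : Nat) : Int) := Int.natCast_nonneg _
    have hc0s : ((Nat.sqrt rem.toNat : Nat) : Int) ≤ s := hle hrem
    rw [if_neg hneg]
    by_cases hsq : ((Nat.sqrt rem.toNat : Nat) : Int) * ((Nat.sqrt rem.toNat : Nat) : Int) = rem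
    · rw [if_pos hsq]
      have hpe : ∀ c ∈ PySem.List.pyRange (-s) (s + 1) 1,
          (decide (c * c = rem) = true ↔ ((c == ((Nat.sqrt rem.toNat : Nat) : Int)
            || c == -((Nat.sqrt rem.toNat : Nat) : Int)) = true)) := by
        intro c _
        have hiff : c * c = rem ↔
            (c = ((Nat.sqrt rem.toNat : Nat) : Int) ∨ c = -((Nat.sqrt rem.toNat : Nat) : Int)) := by
          have h' := mul_self_eq_mul_self_iff (a := c) (b := ((Nat.sqrt rem.toNat : Nat) : Int))
          rw [hsq] at h'
          exact h'
        simp [hiff]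
      rw [List.countP_congr hpe]
      have hnd := PySem.List.nodup_pyRange_one (a := -s) (b := s + 1)
      have hmem1 : ((Nat.sqrt rem.toNat : Nat) : Int) ∈ PySem.List.pyRange (-s) (s + 1) 1 :=
        PySem.List.mem_pyRange_one.mpr ⟨by omega, by omega⟩
      have hmem2 : -((Nat.sqrt rem.toNat : Nat) : Int) ∈ PySem.List.pyRange (-s) (s + 1) 1 :=
        PySem.List.mem_pyRange_one.mpr ⟨by omega, by omega⟩
      by_cases h0 : 0 < ((Nat.sqrt rem.toNat : Nat) : Int)
      · rw [if_pos h0]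
        rw [pv_countP_or _ _ _ (by
          intro x _ hx
          simp only [beq_iff_eq] at hx
          omega)]
        have h1 : (PySem.List.pyRange (-s) (s + 1) 1).countP
            (fun x => x == ((Nat.sqrt rem.toNat : Nat) : Int)) = 1 := by
          rw [← List.count_eq_countP]
          exact List.count_eq_one_of_mem hnd hmem1
        have h2 : (PySem.List.pyRange (-s) (s + 1) 1).countP
            (fun x => x == -((Nat.sqrt rem.toNat : Nat) : Int)) = 1 := by
          rw [← List.count_eq_countP]
          exact List.count_eq_one_of_mem hnd hmem2
        rw [h1, h2]
        norm_num
      · rw [if_neg h0]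
        have hz : ((Nat.sqrt rem.toNat : Nat) : Int) = 0 := by omega
        have : (PySem.List.pyRange (-s) (s + 1) 1).countP
            (fun c => (c == ((Nat.sqrt rem.toNat : Nat) : Int)
              || c == -((Nat.sqrt rem.toNat : Nat) : Int))) =
            (PySem.List.pyRange (-s) (s + 1) 1).countP
            (fun c => c == ((Nat.sqrt rem.toNat : Nat) : Int)) :=
          List.countP_congr (by intro c _; rw [hz]; simp)
        rw [this, ← List.count_eq_countP, List.count_eq_one_of_mem hnd hmem1]
        norm_num
    · rw [if_neg hsq]
      have : (PySem.List.pyRange (-s) (s + 1) 1).countP (fun c => decide (c * c = rem)) = 0 :=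
        List.countP_eq_zero.mpr (by
          intro c _
          simp only [decide_eq_true_eq]
          intro hc
          have habs := pv_sqrt_of_sq c rem hc
          apply hsq
          rw [habs]
          push_cast
          rw [abs_mul_abs_self]
          exact hc)
      simp [this]

-- the histogram step function (the body of B's inner loop)
def pvHStep (N : Int) (s2 : List Int) (v : Int) : List Int :=
  if v ≤ N then PySem.List.pySetD s2 v (PySem.List.pyGetD s2 v 0 + 1) else s2

theorem pv_hist_getD (N : Int) (l : List Int) (xs : List Int) (i : Int)
    (hl : ∀ v ∈ l, 0 ≤ v) (hi0 : 0 ≤ i) (hiL : i < (xs.length : Int)) :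
    PySem.List.pyGetD (l.foldl (pvHStep N) xs) i 0 =
      PySem.List.pyGetD xs i 0 + (l.countP (fun v => decide (v = i ∧ v ≤ N)) : Int) := by
  induction l generalizing xs with
  | nil => simp
  | cons v t ih =>
      have hv0 : 0 ≤ v := hl v (by simp)
      have ht : ∀ w ∈ t, 0 ≤ w := fun w hw => hl w (by simp [hw])
      rw [List.foldl_cons,
        ih (pvHStep N xs v) ht (by
          unfold pvHStep; split
          · simpa [PySem.List.length_pySetD] using hiL
          · exact hiL)]
      have hstep : PySem.List.pyGetD (pvHStep N xs v) i 0 =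
          PySem.List.pyGetD xs i 0 + (if v = i ∧ v ≤ N then (1:Int) else 0) := by
        unfold pvHStep
        split
        · rename_i hvN
          rw [PySem.List.pySetD_of_nonneg _ _ hv0]
          by_cases hvi : v = i
          · subst hvi
            rw [PySem.List.pyGetD_eq_getElem _ _ hi0 (by simpa using hiL),
                PySem.List.pyGetD_eq_getElem _ _ hi0 hiL]
            rw [List.getElem_set_self]
            simp [hvN]
          · have hne : v.toNat ≠ i.toNat := by omega
            by_cases hvL : v.toNat < xs.length
            · rw [PySem.List.pyGetD_eq_getElem _ _ hi0 (by simpa using hiL),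
                  PySem.List.pyGetD_eq_getElem _ _ hi0 hiL]
              rw [List.getElem_set_ne (by omega)]
              simp [hvi]
            · rw [List.set_eq_of_length_le (by omega)]
              simp [hvi]
        · rename_i hvN
          simp [hvN]
      rw [hstep, List.countP_cons]
      have : (decide (v = i ∧ v ≤ N) : Bool) = true ↔ (v = i ∧ v ≤ N) := by simp
      by_cases hc : v = i ∧ v ≤ N
      · simp [hc]
        omega
      · simp [hc]

-- Python's list indexing at a nonnegative in-or-out-of-range index, via List.getD
theorem pv_pyGetD_nonneg (l : List Int) (i : Int) (h : 0 ≤ i) :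
    PySem.List.pyGetD l i 0 = l.getD i.toNat 0 := by
  obtain ⟨n, rfl⟩ := Int.eq_ofNat_of_zero_le h
  simp [PySem.List.pyGetD_natCast]

-- the Array form of the histogram step used by the port of B
def pvHStepA (N : Int) (s2 : Array Int) (v : Int) : Array Int :=
  if v ≤ N then s2.setIfInBounds v.toNat (s2.getD v.toNat 0 + 1) else s2

theorem pv_arr_getD (xs : Array Int) (n : Nat) (d : Int) : xs.getD n d = xs.toList.getD n d := by
  simp only [Array.getD, List.getD]
  split <;> simp_all

theorem pv_stepA_toList (N : Int) (s2 : Array Int) (v : Int) (hv : 0 ≤ v) :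
    (pvHStepA N s2 v).toList = pvHStep N s2.toList v := by
  unfold pvHStepA pvHStep
  split
  · rw [PySem.List.pySetD_of_nonneg _ _ hv, Array.toList_setIfInBounds, pv_arr_getD,
      pv_pyGetD_nonneg _ _ hv]
  · rfl

theorem pv_histA_toList (N : Int) (l : List Int) (hl : ∀ v ∈ l, 0 ≤ v) (xs : Array Int) :
    (l.foldl (pvHStepA N) xs).toList = l.foldl (pvHStep N) xs.toList := by
  induction l generalizing xs with
  | nil => rfl
  | cons v t ih =>
      rw [List.foldl_cons, List.foldl_cons,
        ih (fun w hw => hl w (by simp [hw])), pv_stepA_toList N xs v (hl v (by simp))]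

-- flattening a nested foldl
theorem pv_foldl_flatMap {α β γ : Type} (l : List α) (g : α → List β)
    (f : γ → β → γ) (init : γ) :
    (l.flatMap g).foldl f init = l.foldl (fun acc x => (g x).foldl f acc) init := by
  induction l generalizing init with
  | nil => rfl
  | cons x t ih => simp [List.flatMap_cons, List.foldl_append, ih]

theorem pv_A_eq (N : Int) (h : 0 ≤ N) :
    r3 N =
      ((PySem.List.pyRange (-(Nat.sqrt N.toNat : Int)) ((Nat.sqrt N.toNat : Int) + 1) 1).map (fun a =>
        ((PySem.List.pyRange (-(Nat.sqrt N.toNat : Int)) ((Nat.sqrt N.toNat : Int) + 1) 1).map (fun b =>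
          ((PySem.List.pyRange (-(Nat.sqrt N.toNat : Int)) ((Nat.sqrt N.toNat : Int) + 1) 1).map (fun c =>
            pvInd (decide (a * a + b * b + c * c = N)))).sum)).sum)).sum := by
  have hs0 : (0:Int) ≤ ((Nat.sqrt N.toNat : Nat) : Int) := Int.natCast_nonneg _
  have hmono : ∀ a b : Int, 0 ≤ N - a * a - b * b →
      ((Nat.sqrt (N - a * a - b * b).toNat : Nat) : Int) ≤ ((Nat.sqrt N.toNat : Nat) : Int) := by
    intro a b hr
    have ha := mul_self_nonneg a
    have hb := mul_self_nonneg b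
    have hle : (N - a * a - b * b).toNat ≤ N.toNat := by omega
    exact_mod_cast Nat.sqrt_le_sqrt hle
  simp only [r3]
  have hR : ∀ (a acc : Int),
      (PySem.List.pyRange (-(Nat.sqrt N.toNat : Int)) ((Nat.sqrt N.toNat : Int) + 1) 1).foldl
        (fun count b =>
          let rem := N - a * a - b * b
          if rem < 0 then count
          else
            let c : Int := (Nat.sqrt rem.toNat : Int)
            if c * c = rem then (if c > 0 then count + 1 + 1 else count + 1) else count) acc
      = acc + ((PySem.List.pyRange (-(Nat.sqrt N.toNat : Int)) ((Nat.sqrt N.toNat : Int) + 1) 1).map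
          (fun b => (((PySem.List.pyRange (-(Nat.sqrt N.toNat : Int)) ((Nat.sqrt N.toNat : Int) + 1) 1).countP
            (fun c => decide (a * a + b * b + c * c = N)) : Nat) : Int))).sum := by
    intro a acc
    have h1 : (PySem.List.pyRange (-(Nat.sqrt N.toNat : Int)) ((Nat.sqrt N.toNat : Int) + 1) 1).foldl
        (fun count b =>
          let rem := N - a * a - b * b
          if rem < 0 then count
          else
            let c : Int := (Nat.sqrt rem.toNat : Int)
            if c * c = rem then (if c > 0 then count + 1 + 1 else count + 1) else count) acc
        = (PySem.List.pyRange (-(Nat.sqrt N.toNat : Int)) ((Nat.sqrt N.toNat : Int) + 1) 1).foldl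
        (fun count b => count + (((PySem.List.pyRange (-(Nat.sqrt N.toNat : Int)) ((Nat.sqrt N.toNat : Int) + 1) 1).countP
          (fun c => decide (a * a + b * b + c * c = N)) : Nat) : Int)) acc := by
      apply PySem.List.foldl_congr_mem
      intro acc' b _
      have hcc : (PySem.List.pyRange (-(Nat.sqrt N.toNat : Int)) ((Nat.sqrt N.toNat : Int) + 1) 1).countP
            (fun c => decide (a * a + b * b + c * c = N))
            = (PySem.List.pyRange (-(Nat.sqrt N.toNat : Int)) ((Nat.sqrt N.toNat : Int) + 1) 1).countP
            (fun c => decide (c * c = N - a * a - b * b)) :=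
          List.countP_congr (by
            intro c _
            simp only [decide_eq_true_eq]
            constructor <;> intro h' <;> linarith)
      have hcnt := pv_countR ((Nat.sqrt N.toNat : Nat) : Int) (N - a * a - b * b) hs0
        (fun hr => hmono a b hr)
      rw [hcc, hcnt]
      dsimp only
      split_ifs <;> omega
    rw [h1, PySem.List.foldl_add]
  have h2 : (PySem.List.pyRange (-(Nat.sqrt N.toNat : Int)) ((Nat.sqrt N.toNat : Int) + 1) 1).foldl
      (fun count a =>
        (PySem.List.pyRange (-(Nat.sqrt N.toNat : Int)) ((Nat.sqrt N.toNat : Int) + 1) 1).foldl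
          (fun count b =>
            let rem := N - a * a - b * b
            if rem < 0 then count
            else
              let c : Int := (Nat.sqrt rem.toNat : Int)
              if c * c = rem then (if c > 0 then count + 1 + 1 else count + 1) else count) count) 0
      = (PySem.List.pyRange (-(Nat.sqrt N.toNat : Int)) ((Nat.sqrt N.toNat : Int) + 1) 1).foldl
      (fun count a => count + ((PySem.List.pyRange (-(Nat.sqrt N.toNat : Int)) ((Nat.sqrt N.toNat : Int) + 1) 1).map
        (fun b => (((PySem.List.pyRange (-(Nat.sqrt N.toNat : Int)) ((Nat.sqrt N.toNat : Int) + 1) 1).countP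
          (fun c => decide (a * a + b * b + c * c = N)) : Nat) : Int))).sum) 0 := by
    apply PySem.List.foldl_congr_mem
    intro acc a _
    exact hR a acc
  rw [h2, PySem.List.foldl_add, zero_add]
  refine congrArg List.sum (List.map_congr_left fun a _ => congrArg List.sum (List.map_congr_left fun b _ => ?_))
  exact (pv_pvInd_sum _ _).symm

theorem pv_B_eq (N : Int) (h : 0 ≤ N) :
    r3_alt N =
      ((PySem.List.pyRange (-(Nat.sqrt N.toNat : Int)) ((Nat.sqrt N.toNat : Int) + 1) 1).map (fun c =>
        ((PySem.List.pyRange (-(Nat.sqrt N.toNat : Int)) ((Nat.sqrt N.toNat : Int) + 1) 1).map (fun a =>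
          ((PySem.List.pyRange (-(Nat.sqrt N.toNat : Int)) ((Nat.sqrt N.toNat : Int) + 1) 1).map (fun b =>
            pvInd (decide (a * a + b * b + c * c = N)))).sum)).sum)).sum := by
  have hNt : ((N.toNat : Nat) : Int) = N := Int.toNat_of_nonneg h
  have hssq : ((Nat.sqrt N.toNat : Nat) : Int) * ((Nat.sqrt N.toNat : Nat) : Int) ≤ N := by
    have h1 := Nat.sqrt_le' N.toNat
    have h2 : ((N.toNat.sqrt ^ 2 : Nat) : Int) ≤ ((N.toNat : Nat) : Int) := by exact_mod_cast h1
    rw [hNt] at h2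
    push_cast at h2
    nlinarith [h2]
  have hcsq : ∀ c ∈ PySem.List.pyRange (-(Nat.sqrt N.toNat : Int)) ((Nat.sqrt N.toNat : Int) + 1) 1,
      c * c ≤ N := by
    intro c hc
    obtain ⟨h1, h2⟩ := PySem.List.mem_pyRange_one.mp hc
    have habs : |c| ≤ ((Nat.sqrt N.toNat : Nat) : Int) := abs_le.mpr ⟨by omega, by omega⟩
    calc c * c = |c| * |c| := (abs_mul_abs_self c).symm
      _ ≤ ((Nat.sqrt N.toNat : Nat) : Int) * ((Nat.sqrt N.toNat : Nat) : Int) :=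
          mul_self_le_mul_self (abs_nonneg c) habs
      _ ≤ N := hssq
  have hVpos : ∀ v ∈ (PySem.List.pyRange (-(Nat.sqrt N.toNat : Int)) ((Nat.sqrt N.toNat : Int) + 1) 1).flatMap
      (fun a => (PySem.List.pyRange (-(Nat.sqrt N.toNat : Int)) ((Nat.sqrt N.toNat : Int) + 1) 1).map
        (fun b => a * a + b * b)), 0 ≤ v := by
    intro v hv
    obtain ⟨a, _, hv2⟩ := List.mem_flatMap.mp hv
    obtain ⟨b, _, rfl⟩ := List.mem_map.mp hv2
    have := mul_self_nonneg a
    have := mul_self_nonneg b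
    omega
  simp only [r3_alt]
  have hS2 : (PySem.List.pyRange (-(Nat.sqrt N.toNat : Int)) ((Nat.sqrt N.toNat : Int) + 1) 1).foldl
      (fun s2 a =>
        (PySem.List.pyRange (-(Nat.sqrt N.toNat : Int)) ((Nat.sqrt N.toNat : Int) + 1) 1).foldl
          (fun s2 b =>
            let v := a * a + b * b
            if v ≤ N then s2.setIfInBounds v.toNat (s2.getD v.toNat 0 + 1) else s2) s2)
      (Array.replicate (N + 1).toNat 0)
      = ((PySem.List.pyRange (-(Nat.sqrt N.toNat : Int)) ((Nat.sqrt N.toNat : Int) + 1) 1).flatMap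
          (fun a => (PySem.List.pyRange (-(Nat.sqrt N.toNat : Int)) ((Nat.sqrt N.toNat : Int) + 1) 1).map
            (fun b => a * a + b * b))).foldl (pvHStepA N) (Array.replicate (N + 1).toNat 0) := by
    rw [pv_foldl_flatMap]
    refine PySem.List.foldl_congr_mem _ _ _ _ ?_
    intro acc a _
    rw [List.foldl_map]
    rfl
  simp only [hS2]
  rw [PySem.List.foldl_add, zero_add]
  refine congrArg List.sum (List.map_congr_left fun c hc => ?_)
  have hc2 := hcsq c hc
  have hcc0 : 0 ≤ c * c := mul_self_nonneg c
  rw [pv_arr_getD, pv_histA_toList N _ hVpos, Array.toList_replicate,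
    ← pv_pyGetD_nonneg _ _ (by omega)]
  have hget := pv_hist_getD N _ (List.replicate (N + 1).toNat 0) (N - c * c) hVpos
    (by omega) (by rw [List.length_replicate]; omega)
  rw [hget]
  have hinit : PySem.List.pyGetD (List.replicate (N + 1).toNat (0 : Int)) (N - c * c) 0 = 0 := by
    rw [PySem.List.pyGetD_eq_getElem _ _ (by omega) (by rw [List.length_replicate]; omega)]
    simp
  rw [hinit, zero_add]
  have hc3 : ((PySem.List.pyRange (-(Nat.sqrt N.toNat : Int)) ((Nat.sqrt N.toNat : Int) + 1) 1).flatMap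
      (fun a => (PySem.List.pyRange (-(Nat.sqrt N.toNat : Int)) ((Nat.sqrt N.toNat : Int) + 1) 1).map
        (fun b => a * a + b * b))).countP (fun v => decide (v = N - c * c ∧ v ≤ N))
      = ((PySem.List.pyRange (-(Nat.sqrt N.toNat : Int)) ((Nat.sqrt N.toNat : Int) + 1) 1).flatMap
      (fun a => (PySem.List.pyRange (-(Nat.sqrt N.toNat : Int)) ((Nat.sqrt N.toNat : Int) + 1) 1).map
        (fun b => a * a + b * b))).countP (fun v => decide (v = N - c * c)) :=
    List.countP_congr (by
      intro v _
      simp only [decide_eq_true_eq]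
      constructor
      · exact fun hv => hv.1
      · exact fun hv => ⟨hv, by omega⟩)
  rw [hc3, List.countP_flatMap, Nat.cast_list_sum, List.map_map]
  refine congrArg List.sum (List.map_congr_left fun a _ => ?_)
  rw [pv_pvInd_sum]
  simp only [Function.comp, List.countP_map]
  congr 1
  refine List.countP_congr ?_
  intro b _
  simp only [Function.comp, decide_eq_true_eq]
  constructor <;> intro h' <;> linarith

-- ===== VERDICT (by name: the statement is the Claim_ definition above) =====
theorem r3_spec : Claim_equal_r3 := by
  intro N _ hN
  unfold Spec_r3
  rw [pv_A_eq N hN, pv_B_eq N hN]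
  exact (congrArg List.sum (List.map_congr_left (fun a _ => pv_sum_swap _ _ _))).trans
    (pv_sum_swap _ _ _)
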